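-- pv_equiv track=rewrite | github.com/Giovanipt2/MC102 | lab06.py | multiplica_todos
-- ===== SOURCE A (Python) =====
-- def multiplica_todos(v1: list[int], v2: list[int]) -> list[int]:
--     '''Multiplica cada elemento de um vetor pelo outro e soma o resultado
--
--     Parâmetros:
--     v1 -- lista de inteiros
--     v2 -- lista de inteiros
--
--     Retorno:
--     vetor_corrente -- lista de inteiros
--     '''
--
--     vetor_corrente = []
--
--     for i in range(len(v1)):
--         resultado_i = 0
--         for h in range(len(v2)):
--             resultado_i += v1[i] * v2[h]
--         vetor_corrente.append(resultado_i)
--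
--     return vetor_corrente
-- ===== SOURCE B (Python) =====
-- def multiplica_todos(v1: list[int], v2: list[int]) -> list[int]:
--     s = sum(v2)
--     return [x * s for x in v1]
-- ===== Notes on version B (the rewrite author's own statement) =====
-- stated objective: faster
-- what changed: Precompute sum(v2) once and map each v1[i] to v1[i]*sum, replacing the nested index loops.
import Mathlib
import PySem

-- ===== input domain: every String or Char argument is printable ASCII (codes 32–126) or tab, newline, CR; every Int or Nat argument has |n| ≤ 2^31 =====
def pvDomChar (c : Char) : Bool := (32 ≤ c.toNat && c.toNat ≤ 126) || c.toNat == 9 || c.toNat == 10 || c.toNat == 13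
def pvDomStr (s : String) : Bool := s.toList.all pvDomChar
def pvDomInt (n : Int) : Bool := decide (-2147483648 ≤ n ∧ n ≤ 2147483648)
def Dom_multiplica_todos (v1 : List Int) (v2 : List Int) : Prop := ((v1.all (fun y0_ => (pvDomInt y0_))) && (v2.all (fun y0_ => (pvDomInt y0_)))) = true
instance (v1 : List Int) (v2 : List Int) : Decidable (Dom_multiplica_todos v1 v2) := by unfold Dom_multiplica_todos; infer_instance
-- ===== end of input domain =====

-- B replaces A's nested index loops by one precomputed sum(v2) and a single map (faster: asymptotic O(n+m) vs O(n*m)).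

-- ===== PORT A =====
def multiplica_todos (v1 : List Int) (v2 : List Int) : List Int :=
  (PySem.List.pyRange 0 (v1.length : Int) 1).foldl
    (fun vetor_corrente i =>
      vetor_corrente ++
        [(PySem.List.pyRange 0 (v2.length : Int) 1).foldl
          (fun resultado_i h =>
            resultado_i + PySem.List.pyGetD v1 i 0 * PySem.List.pyGetD v2 h 0) 0]) []

-- ===== PORT B =====
def multiplica_todos_alt (v1 : List Int) (v2 : List Int) : List Int :=
  let s := v2.foldl (· + ·) 0
  v1.map (fun x => x * s)

-- ===== PRECONDITION & SPEC =====
def Spec_multiplica_todos (v1 : List Int) (v2 : List Int) (out : List Int) : Prop := out = multiplica_todos_alt v1 v2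
instance (v1 : List Int) (v2 : List Int) (out : List Int) : Decidable (Spec_multiplica_todos v1 v2 out) := by unfold Spec_multiplica_todos; infer_instance

-- ===== CLAIM (what is proved, stated in full; the proofs are below) =====
def Claim_equal_multiplica_todos : Prop := ∀ (v1 : List Int) (v2 : List Int), Dom_multiplica_todos v1 v2 → Spec_multiplica_todos v1 v2 (multiplica_todos v1 v2)

-- ===== LEMMAS AND PROOFS =====

-- sum of c * y over a list is c times the sum
lemma mul_sum_eq (c : Int) (l : List Int) : (l.map (HMul.hMul c)).sum = c * l.sum := by
  induction l with
  | nil => simp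
  | cons y ys ih => simp [ih, mul_add]


-- ===== VERDICT (by name: the statement is the Claim_ definition above) =====
theorem multiplica_todos_spec : Claim_equal_multiplica_todos := by
  intro v1 v2 _
  unfold Spec_multiplica_todos multiplica_todos multiplica_todos_alt
  have hsum : v2.foldl (· + ·) 0 = v2.sum := by
    simpa using PySem.List.foldl_add (l := v2) (g := fun y => y) (a := 0)
  have hinner : ∀ i : Int,
      (PySem.List.pyRange 0 (v2.length : Int) 1).foldl
        (fun resultado_i h =>
          resultado_i + PySem.List.pyGetD v1 i 0 * PySem.List.pyGetD v2 h 0) 0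
      = PySem.List.pyGetD v1 i 0 * v2.foldl (· + ·) 0 := by
    intro i
    rw [PySem.List.foldl_pyRange_zero_pyGetD' v2 0
      (fun r y => r + PySem.List.pyGetD v1 i 0 * y) 0]
    rw [PySem.List.foldl_add, hsum]
    simpa using mul_sum_eq (PySem.List.pyGetD v1 i 0) v2
  simp only [hinner, hsum]
  rw [PySem.List.foldl_pyRange_zero_pyGetD' v1 0
    (fun acc x => acc ++ [x * v2.sum]) []]
  exact PySem.List.foldl_append_singleton_eq_map _ _ []
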